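-- pv_equiv track=rewrite | github.com/8r14z/coding-interview-prep | MyIDE.py | solve_generate_graph
-- ===== SOURCE A (Python) =====
-- import math
-- from collections import deque
-- import math
--
-- def solve_generate_graph(n, edges):
--     def generate_graph(edges):
--         graph = {}
--         for edge in edges:
--             p,q = [int(v) for v in edge.split()]
--             if p in graph:
--                 graph[p].append(q)
--             else:
--                 graph[p] = [q]
--             if q in graph:
--                 graph[q].append(p)
--             else:
--                 graph[q] = [p]
--
--         return graph
--
--     def bfs(start, graph):
--         queue = deque()
--         queue.append(start)
--         visited = set([start])
--
--         while queue:
--             current_vertex = queue.popleft()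
--             if current_vertex not in graph:
--                 continue
--
--             neighbors = graph[current_vertex]
--             for vertex in neighbors:
--                 if vertex not in visited:
--                     visited.add(vertex)
--                     queue.append(vertex)
--
--         return visited
--
--     graph = generate_graph(edges)
--     processing_vertices = set(range(1, n+1))
--     visited_count = 0
--     sum = 0
--     while processing_vertices:
--         start = processing_vertices.pop()
--         visited_vertices = bfs(start, graph)
--         processing_vertices -= visited_vertices
--         visited_count += len(visited_vertices)
--         sum += math.ceil(math.sqrt(len(visited_vertices)))
--
--     return sum + (n-visited_count)
-- ===== SOURCE B (Python) =====
-- import math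
--
--
-- def solve_generate_graph(n, edges):
--     # Level-synchronous set saturation instead of per-vertex queue BFS;
--     # single range scan with a 'seen' set instead of a shrinking worklist set.
--     adj = {}
--     for e in edges:
--         p, q = (int(t) for t in e.split())
--         adj.setdefault(p, set()).add(q)
--         adj.setdefault(q, set()).add(p)
--     seen = set()
--     total = n
--     for v in range(1, n + 1):
--         if v in seen:
--             continue
--         comp = {v}
--         frontier = {v}
--         while frontier:
--             frontier = {w for u in frontier for w in adj.get(u, ())} - comp
--             comp |= frontier
--         seen |= comp
--         s = len(comp)
--         r = math.isqrt(s)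
--         total += (r if r * r == s else r + 1) - s
--     return total
-- ===== Notes on version B (the rewrite author's own statement) =====
-- stated objective: alternative
-- what changed: Per-vertex queue BFS with a shrinking worklist set and two accumulators is replaced by level-synchronous set saturation (frontier = neighbours(frontier) - component) over an adjacency dict of sets, driven by a single 1..n range scan with a seen set and one fused accumulator; ceil(sqrt) is computed with integer isqrt instead of float math.
import Mathlib
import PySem

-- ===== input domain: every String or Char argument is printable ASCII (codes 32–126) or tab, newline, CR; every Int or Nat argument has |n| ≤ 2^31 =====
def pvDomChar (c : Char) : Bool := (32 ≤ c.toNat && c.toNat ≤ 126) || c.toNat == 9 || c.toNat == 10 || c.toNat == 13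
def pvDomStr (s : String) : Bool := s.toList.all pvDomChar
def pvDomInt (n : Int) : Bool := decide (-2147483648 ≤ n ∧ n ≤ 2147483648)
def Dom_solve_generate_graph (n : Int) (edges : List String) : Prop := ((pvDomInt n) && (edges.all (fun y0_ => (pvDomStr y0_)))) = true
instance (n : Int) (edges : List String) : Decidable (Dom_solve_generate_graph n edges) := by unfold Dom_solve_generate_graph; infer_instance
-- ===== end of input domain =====

-- B replaces the per-vertex queue BFS / shrinking-worklist loop of A by level-synchronous
-- set saturation over an adjacency dict of sets, driven by a 1..n scan with a seen set and
-- one fused accumulator (same asymptotic cost; a different traversal whose order we prove immaterial).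


-- ===== PORT A =====
-- 'p, q = [int(v) for v in edge.split()]' — both Pythons parse an edge string identically;
-- total here, with a junk value outside Pre_ (where both Pythons raise ValueError).
def pvParseEdge (e : String) : Int × Int :=
  match (PySem.Str.split₀ e).map PySem.Int.ofStr? with
  | [some p, some q] => (p, q)
  | _ => (0, 0)

-- math.ceil(math.sqrt(k)) for a nonnegative int k, via integer sqrt: exact whenever k < 2^52
-- (double sqrt is correctly rounded there), hence on every component size reachable in Dom.
def pvCeilSqrt (k : Nat) : Int :=
  if Nat.sqrt k * Nat.sqrt k = k then (Nat.sqrt k : Int) else (Nat.sqrt k : Int) + 1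

def pvGenerateGraph (edges : List String) : PySem.Dict Int (List Int) :=
  edges.foldl (fun graph e =>
    let pq := pvParseEdge e
    let graph := if graph.contains pq.1 then graph.modify pq.1 [] (fun l => l ++ [pq.2])
                 else graph.insert pq.1 [pq.2]
    if graph.contains pq.2 then graph.modify pq.2 [] (fun l => l ++ [pq.1])
    else graph.insert pq.2 [pq.1]) PySem.Dict.empty

-- the 'while queue' loop; fuel is only a totality guard (proved sufficient below)
def pvBfsLoop (graph : PySem.Dict Int (List Int)) :
    Nat → List Int → PySem.Set Int → PySem.Set Int
  | 0, _, visited => visited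
  | _ + 1, [], visited => visited
  | fuel + 1, cur :: queue, visited =>
    match graph.get? cur with
    | none => pvBfsLoop graph fuel queue visited
    | some neighbors =>
      let st := neighbors.foldl
        (fun (st : List Int × PySem.Set Int) v =>
          if st.2.contains v then st else (st.1 ++ [v], st.2.add v))
        (queue, visited)
      pvBfsLoop graph fuel st.1 st.2

def pvBfs (start : Int) (graph : PySem.Dict Int (List Int)) (fuel : Nat) : PySem.Set Int :=
  pvBfsLoop graph fuel [start] (PySem.Set.add PySem.Set.empty start)

-- the 'while processing_vertices' loop (set.pop ported as taking the head; the returned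
-- value is independent of that order); returns (sum, visited_count)
def pvSolveLoop (graph : PySem.Dict Int (List Int)) (bfuel : Nat) :
    Nat → PySem.Set Int → Int → Int → Int × Int
  | 0, _, s, c => (s, c)
  | _ + 1, [], s, c => (s, c)
  | fuel + 1, start :: rest, s, c =>
    let visited := pvBfs start graph bfuel
    pvSolveLoop graph bfuel fuel (PySem.Set.diff rest visited)
      (s + pvCeilSqrt visited.length) (c + visited.length)

def solve_generate_graph (n : Int) (edges : List String) : Int :=
  let graph := pvGenerateGraph edges
  let processing := PySem.Set.ofList (PySem.List.pyRange 1 (n + 1) 1)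
  let sc := pvSolveLoop graph (2 + 4 * edges.length) processing.length processing 0 0
  sc.1 + (n - sc.2)

-- ===== PORT B =====
-- adjacency dict of neighbour SETS: adj.setdefault(p, set()).add(q) etc.
def pvAdj (edges : List String) : PySem.Dict Int (PySem.Set Int) :=
  edges.foldl (fun adj e =>
    let pq := pvParseEdge e
    let adj := adj.modify pq.1 PySem.Set.empty (fun s => s.add pq.2)
    adj.modify pq.2 PySem.Set.empty (fun s => s.add pq.1)) PySem.Dict.empty

-- {w for u in frontier for w in adj.get(u, ())}
def pvNbhd (adj : PySem.Dict Int (PySem.Set Int)) (frontier : PySem.Set Int) : PySem.Set Int :=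
  frontier.foldl (fun acc u => acc.update (adj.getD u PySem.Set.empty)) PySem.Set.empty

-- the 'while frontier' saturation loop; fuel is only a totality guard (proved sufficient below)
def pvSatLoop (adj : PySem.Dict Int (PySem.Set Int)) :
    Nat → PySem.Set Int → PySem.Set Int → PySem.Set Int
  | 0, _, comp => comp
  | _ + 1, [], comp => comp
  | fuel + 1, frontier, comp =>
    let nf := PySem.Set.diff (pvNbhd adj frontier) comp
    pvSatLoop adj fuel nf (comp.update nf)

def solve_generate_graph_alt (n : Int) (edges : List String) : Int :=
  let adj := pvAdj edges
  let fuel := 2 + 4 * edges.length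
  ((PySem.List.pyRange 1 (n + 1) 1).foldl
    (fun (st : PySem.Set Int × Int) v =>
      if st.1.contains v then st
      else
        let comp := pvSatLoop adj fuel [v] [v]
        let s : Int := comp.length
        let r : Int := (Nat.sqrt comp.length : Int)
        (st.1.update comp, st.2 + ((if r * r = s then r else r + 1) - s)))
    (PySem.Set.empty, n)).2

-- ===== PRECONDITION & SPEC =====
-- Pre_ excludes exactly the inputs on which A raises ValueError: an edge string that does not
-- split into exactly two tokens, or a token int() rejects.
def Pre_solve_generate_graph (n : Int) (edges : List String) : Prop :=
  ∀ e ∈ edges, (PySem.Str.split₀ e).length = 2 ∧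
    ∀ t ∈ PySem.Str.split₀ e, (PySem.Int.ofStr? t).isSome = true
instance (n : Int) (edges : List String) : Decidable (Pre_solve_generate_graph n edges) := by
  unfold Pre_solve_generate_graph; infer_instance

def pvWitness_solve_generate_graph : Int × List String := (3, ["1 2"])

def Spec_solve_generate_graph (n : Int) (edges : List String) (out : Int) : Prop :=
  out = solve_generate_graph_alt n edges
instance (n : Int) (edges : List String) (out : Int) : Decidable (Spec_solve_generate_graph n edges out) := by
  unfold Spec_solve_generate_graph; infer_instance

-- ===== CLAIM (what is proved, stated in full; the proofs are below) =====
def Claim_equal_solve_generate_graph : Prop := ∀ (n : Int) (edges : List String), Dom_solve_generate_graph n edges → Pre_solve_generate_graph n edges → Spec_solve_generate_graph n edges (solve_generate_graph n edges)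

-- ===== LEMMAS AND PROOFS =====

-- the parsed edge list and the graph relation both programs realise
def pvE (edges : List String) : List (Int × Int) := edges.map pvParseEdge

def pvAdjRel (ps : List (Int × Int)) (u v : Int) : Prop := (u, v) ∈ ps ∨ (v, u) ∈ ps

def pvReach (ps : List (Int × Int)) (u v : Int) : Prop :=
  Relation.ReflTransGen (pvAdjRel ps) u v

-- all vertices occurring in edges
def pvVerts (edges : List String) : Finset Int :=
  ((pvE edges).map Prod.fst ++ (pvE edges).map Prod.snd).toFinset

lemma pvVerts_card_le (edges : List String) : (pvVerts edges).card ≤ 2 * edges.length := by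
  calc (pvVerts edges).card ≤ ((pvE edges).map Prod.fst ++ (pvE edges).map Prod.snd).length :=
        List.toFinset_card_le _
    _ = 2 * edges.length := by simp [pvE]; ring

lemma pvAdjRel_mem_verts {edges : List String} {u v : Int}
    (h : pvAdjRel (pvE edges) u v) : v ∈ pvVerts edges := by
  rcases h with h | h
  · exact List.mem_toFinset.2 (List.mem_append.2 (Or.inr (List.mem_map.2 ⟨(u, v), h, rfl⟩)))
  · exact List.mem_toFinset.2 (List.mem_append.2 (Or.inl (List.mem_map.2 ⟨(v, u), h, rfl⟩)))

-- a key the dict does not contain looks up to the default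
lemma pvDict_getD_of_not_contains {κ ν : Type} [BEq κ] (d : PySem.Dict κ ν) (k : κ) (d0 : ν)
    (h : d.contains k = false) : d.getD k d0 = d0 := by
  have h' : d.items.any (fun p => p.1 == k) = false := by
    simpa [PySem.Dict.contains] using h
  have : d.items.find? (fun p => p.1 == k) = none := by
    rw [List.find?_eq_none]
    exact fun p hp => by simpa using List.any_eq_false.mp h' p hp
  simp [PySem.Dict.getD, PySem.Dict.get?, this]

-- ---- A's graph dict realises pvAdjRel ----
lemma pvStepA_getD (g : PySem.Dict Int (List Int)) (p q u : Int) :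
    (let g1 := if g.contains p then g.modify p [] (fun l => l ++ [q]) else g.insert p [q]
     if g1.contains q then g1.modify q [] (fun l => l ++ [p]) else g1.insert q [p]).getD u []
      = (g.getD u [] ++ (if u = p then [q] else [])) ++ (if u = q then [p] else []) := by
  have h1 : (if g.contains p then g.modify p [] (fun l => l ++ [q])
      else g.insert p [q]).getD u [] = g.getD u [] ++ (if u = p then [q] else []) := by
    by_cases hc : g.contains p
    · by_cases hup : u = p
      · subst hup; simp [hc, PySem.Dict.getD_modify_self]
      · simp [hc, PySem.Dict.getD_modify_of_ne g [] _ hup, hup]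
    · by_cases hup : u = p
      · subst hup
        simp [hc, PySem.Dict.getD_insert_self,
          pvDict_getD_of_not_contains g u [] (Bool.not_eq_true _ ▸ hc)]
      · simp [hc, PySem.Dict.getD_insert_of_ne g _ _ hup, hup]
  set g1 := if g.contains p then g.modify p [] (fun l => l ++ [q]) else g.insert p [q] with hg1
  show (if g1.contains q then g1.modify q [] (fun l => l ++ [p])
      else g1.insert q [p]).getD u [] = _
  by_cases hc : g1.contains q
  · by_cases huq : u = q
    · subst huq; simp [hc, PySem.Dict.getD_modify_self, h1]
    · simp [hc, PySem.Dict.getD_modify_of_ne g1 [] _ huq, huq, h1]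
  · by_cases huq : u = q
    · subst huq
      have h0 : g1.getD u [] = [] := pvDict_getD_of_not_contains g1 u [] (Bool.not_eq_true _ ▸ hc)
      rw [h0] at h1
      simp [hc, PySem.Dict.getD_insert_self, ← h1]
    · simp [hc, PySem.Dict.getD_insert_of_ne g1 _ _ huq, huq, h1]

lemma pvFoldA_mem (es : List String) :
    ∀ (g0 : PySem.Dict Int (List Int)) (u v : Int),
      v ∈ (es.foldl (fun graph e =>
        let pq := pvParseEdge e
        let graph := if graph.contains pq.1 then graph.modify pq.1 [] (fun l => l ++ [pq.2])
                     else graph.insert pq.1 [pq.2]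
        if graph.contains pq.2 then graph.modify pq.2 [] (fun l => l ++ [pq.1])
        else graph.insert pq.2 [pq.1]) g0).getD u []
        ↔ v ∈ g0.getD u [] ∨ pvAdjRel (pvE es) u v := by
  induction es with
  | nil => intro g0 u v; simp [pvE, pvAdjRel]
  | cons e es ih =>
    intro g0 u v
    rw [List.foldl_cons, ih]
    have := pvStepA_getD g0 (pvParseEdge e).1 (pvParseEdge e).2 u
    simp only at this
    rw [this]
    have hmem : v ∈ (g0.getD u [] ++ (if u = (pvParseEdge e).1 then [(pvParseEdge e).2] else []))
        ++ (if u = (pvParseEdge e).2 then [(pvParseEdge e).1] else [])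
        ↔ v ∈ g0.getD u [] ∨ (u = (pvParseEdge e).1 ∧ v = (pvParseEdge e).2)
          ∨ (u = (pvParseEdge e).2 ∧ v = (pvParseEdge e).1) := by
      by_cases h1 : u = (pvParseEdge e).1 <;> by_cases h2 : u = (pvParseEdge e).2 <;>
        simp [h1, h2]
    rw [hmem]
    have hadj : pvAdjRel (pvE (e :: es)) u v
        ↔ ((u = (pvParseEdge e).1 ∧ v = (pvParseEdge e).2)
            ∨ (u = (pvParseEdge e).2 ∧ v = (pvParseEdge e).1)) ∨ pvAdjRel (pvE es) u v := by
      simp only [pvE, pvAdjRel, List.map_cons, List.mem_cons, Prod.ext_iff]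
      tauto
    rw [hadj]
    tauto

lemma pvGenerateGraph_mem (edges : List String) (u v : Int) :
    v ∈ (pvGenerateGraph edges).getD u [] ↔ pvAdjRel (pvE edges) u v := by
  have := pvFoldA_mem edges PySem.Dict.empty u v
  simpa [pvGenerateGraph, pvDict_getD_of_not_contains PySem.Dict.empty u ([] : List Int) (by
    simp [PySem.Dict.contains, PySem.Dict.empty])] using this

-- ---- B's adjacency dict realises pvAdjRel ----
lemma pvStepB_mem (g : PySem.Dict Int (PySem.Set Int)) (p q u v : Int) :
    v ∈ ((g.modify p PySem.Set.empty (fun s => s.add q)).modify q PySem.Set.empty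
        (fun s => s.add p)).getD u PySem.Set.empty
      ↔ v ∈ g.getD u PySem.Set.empty ∨ (u = p ∧ v = q) ∨ (u = q ∧ v = p) := by
  by_cases huq : u = q
  · subst huq
    rw [PySem.Dict.getD_modify_self, PySem.Set.mem_add]
    by_cases hup : u = p
    · subst hup; rw [PySem.Dict.getD_modify_self, PySem.Set.mem_add]; tauto
    · rw [PySem.Dict.getD_modify_of_ne g _ _ hup]; tauto
  · rw [PySem.Dict.getD_modify_of_ne _ _ _ huq]
    by_cases hup : u = p
    · subst hup; rw [PySem.Dict.getD_modify_self, PySem.Set.mem_add]; tauto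
    · rw [PySem.Dict.getD_modify_of_ne g _ _ hup]; tauto

lemma pvFoldB_mem (es : List String) :
    ∀ (g0 : PySem.Dict Int (PySem.Set Int)) (u v : Int),
      v ∈ (es.foldl (fun adj e =>
        let pq := pvParseEdge e
        let adj := adj.modify pq.1 PySem.Set.empty (fun s => s.add pq.2)
        adj.modify pq.2 PySem.Set.empty (fun s => s.add pq.1)) g0).getD u PySem.Set.empty
        ↔ v ∈ g0.getD u PySem.Set.empty ∨ pvAdjRel (pvE es) u v := by
  induction es with
  | nil => intro g0 u v; simp [pvE, pvAdjRel]
  | cons e es ih =>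
    intro g0 u v
    rw [List.foldl_cons, ih]
    show v ∈ ((g0.modify _ _ _).modify _ _ _).getD u PySem.Set.empty ∨ _ ↔ _
    rw [pvStepB_mem]
    have hadj : pvAdjRel (pvE (e :: es)) u v
        ↔ ((u = (pvParseEdge e).1 ∧ v = (pvParseEdge e).2)
            ∨ (u = (pvParseEdge e).2 ∧ v = (pvParseEdge e).1)) ∨ pvAdjRel (pvE es) u v := by
      simp only [pvE, pvAdjRel, List.map_cons, List.mem_cons, Prod.ext_iff]
      tauto
    rw [hadj]
    tauto

lemma pvAdj_mem (edges : List String) (u v : Int) :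
    v ∈ (pvAdj edges).getD u PySem.Set.empty ↔ pvAdjRel (pvE edges) u v := by
  have := pvFoldB_mem edges PySem.Dict.empty u v
  simpa [pvAdj, pvDict_getD_of_not_contains PySem.Dict.empty u (PySem.Set.empty : PySem.Set Int) (by
    simp [PySem.Dict.contains, PySem.Dict.empty]),
    PySem.Set.empty] using this

-- a set containing start and closed under the edge relation contains everything reachable
lemma pvReach_subset {edges : List String} {start : Int} {vis : List Int}
    (hstart : start ∈ vis)
    (hclosed : ∀ u ∈ vis, ∀ w, pvAdjRel (pvE edges) u w → w ∈ vis) :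
    ∀ v, pvReach (pvE edges) start v → v ∈ vis := by
  intro v h
  induction h with
  | refl => exact hstart
  | tail _ hr ih => exact hclosed _ ih _ hr

-- the neighbour loop of A's BFS appends exactly the newly visited vertices
lemma pvBfsInner (ns : List Int) :
    ∀ (q : List Int) (vis : PySem.Set Int),
      ns.foldl (fun (st : List Int × PySem.Set Int) v =>
          if st.2.contains v then st else (st.1 ++ [v], st.2.add v)) (q, vis)
        = (q ++ (PySem.Set.ofList ns).filter (fun y => !vis.contains y), vis.update ns) := by
  induction ns with
  | nil => intro q vis; simp [PySem.Set.update_nil]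
  | cons n ns ih =>
    intro q vis
    rw [List.foldl_cons]
    by_cases hv : (vis.contains n : Bool) = true
    · have hmem : n ∈ vis := (PySem.Set.contains_iff vis n).1 hv
      rw [if_pos hv, ih, PySem.Set.update_cons, PySem.Set.add_of_mem hmem,
        PySem.Set.ofList_cons]
      have hdis : List.filter (fun y => !vis.contains y)
          (n :: (PySem.Set.ofList ns).discard n)
          = List.filter (fun y => !vis.contains y) (PySem.Set.ofList ns) := by
        rw [List.filter_cons]
        have : (!vis.contains n) = false := by simp [hmem]
        rw [this]
        simp only [Bool.false_eq_true, if_false]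
        show List.filter _ (List.filter _ _) = _
        rw [List.filter_filter]
        refine List.filter_congr ?_
        intro x _
        by_cases hxn : x = n
        · subst hxn; simp [hmem]
        · simp [hxn]
      rw [hdis]
    · have hnm : n ∉ vis := fun hm => hv ((PySem.Set.contains_iff vis n).2 hm)
      rw [if_neg hv, ih, PySem.Set.update_cons, PySem.Set.ofList_cons]
      have h2 : (vis.add n).update ns = vis.update (n :: ns) := by
        rw [PySem.Set.update_cons]
      have h1 : List.filter (fun y => !(vis.add n).contains y) (PySem.Set.ofList ns)
          = List.filter (fun y => !vis.contains y) ((PySem.Set.ofList ns).discard n) := by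
        show _ = List.filter _ (List.filter _ _)
        rw [List.filter_filter]
        refine List.filter_congr ?_
        intro x _
        rw [PySem.Set.add_of_not_mem hnm]
        by_cases hxn : x = n
        · subst hxn; simp
        · by_cases hxv : x ∈ vis <;> simp [hxn, hxv]
      have h3 : List.filter (fun y => !vis.contains y)
          (n :: (PySem.Set.ofList ns).discard n)
          = n :: List.filter (fun y => !vis.contains y) ((PySem.Set.ofList ns).discard n) := by
        rw [List.filter_cons]
        have : (!vis.contains n) = true := by simp [hnm]
        rw [this]
        simp
      rw [PySem.Set.update_cons] at h2
      rw [h1, h3]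
      refine Prod.ext ?_ ?_
      · show q ++ [n] ++ _ = q ++ n :: _
        simp
      · exact h2

-- the BFS while-loop: invariant-carrying correctness
lemma pvBfsLoop_spec (edges : List String) (start : Int) :
    ∀ (fuel : Nat) (queue : List Int) (vis : PySem.Set Int),
      vis.Nodup → start ∈ vis →
      (∀ x ∈ queue, x ∈ vis) →
      (∀ x ∈ vis, pvReach (pvE edges) start x) →
      (∀ u ∈ vis, u ∉ queue → ∀ w, pvAdjRel (pvE edges) u w → w ∈ vis) →
      queue.length + 2 * ((pvVerts edges) \ vis.toFinset).card ≤ fuel →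
      (pvBfsLoop (pvGenerateGraph edges) fuel queue vis).Nodup ∧
      ∀ v, v ∈ pvBfsLoop (pvGenerateGraph edges) fuel queue vis ↔ pvReach (pvE edges) start v := by
  intro fuel
  induction fuel with
  | zero =>
    intro queue vis hnd hstart _ hreach hclosed hfuel
    have hq : queue = [] := by
      cases queue with
      | nil => rfl
      | cons a q => simp at hfuel
    subst hq
    refine ⟨hnd, fun v => ⟨fun hv => hreach v hv, ?_⟩⟩
    exact fun h => pvReach_subset hstart (fun u hu _ hw => hclosed u hu (by simp) _ hw) v h
  | succ fuel ih =>
    intro queue vis hnd hstart hqvis hreach hclosed hfuel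
    cases queue with
    | nil =>
      refine ⟨hnd, fun v => ⟨fun hv => hreach v hv, ?_⟩⟩
      exact fun h => pvReach_subset hstart (fun u hu _ hw => hclosed u hu (by simp) _ hw) v h
    | cons cur q =>
      have hcurvis : cur ∈ vis := hqvis cur (by simp)
      cases hg : (pvGenerateGraph edges).get? cur with
      | none =>
        have hstep : pvBfsLoop (pvGenerateGraph edges) (fuel + 1) (cur :: q) vis
            = pvBfsLoop (pvGenerateGraph edges) fuel q vis := by
          simp [pvBfsLoop, hg]
        rw [hstep]
        have hgetD : (pvGenerateGraph edges).getD cur [] = [] := by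
          simp [PySem.Dict.getD, hg]
        have hnoadj : ∀ w, ¬ pvAdjRel (pvE edges) cur w := by
          intro w hw
          have := (pvGenerateGraph_mem edges cur w).2 hw
          rw [hgetD] at this
          simp at this
        refine ih q vis hnd hstart (fun x hx => hqvis x (by simp [hx])) hreach ?_ (by simp at hfuel ⊢; omega)
        intro u hu hq' w hw
        by_cases hc : u = cur
        · subst hc; exact absurd hw (hnoadj w)
        · exact hclosed u hu (by simp [hc, hq']) w hw
      | some ns =>
        have hgetD : (pvGenerateGraph edges).getD cur [] = ns := by
          simp [PySem.Dict.getD, hg]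
        have hAdjcur : ∀ w, pvAdjRel (pvE edges) cur w ↔ w ∈ ns := by
          intro w; rw [← pvGenerateGraph_mem, hgetD]
        have hstep : pvBfsLoop (pvGenerateGraph edges) (fuel + 1) (cur :: q) vis
            = pvBfsLoop (pvGenerateGraph edges) fuel
                (q ++ (PySem.Set.ofList ns).filter (fun y => !vis.contains y))
                (vis.update ns) := by
          simp only [pvBfsLoop, hg]
          rw [pvBfsInner]
        rw [hstep]
        set Δ := (PySem.Set.ofList ns).filter (fun y => !vis.contains y) with hΔ
        have hΔprop : ∀ x ∈ Δ, x ∈ ns ∧ x ∉ vis := by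
          intro x hx
          rcases List.mem_filter.1 hx with ⟨h1, h2⟩
          exact ⟨(PySem.Set.mem_ofList ns x).1 h1, by simpa using h2⟩
        have hΔnd : Δ.Nodup := (PySem.Set.nodup_ofList ns).filter _
        have hvis' : vis.update ns = vis ++ Δ := PySem.Set.update_eq_append_filter vis ns
        rw [hvis']
        have hnd' : (vis ++ Δ).Nodup := by
          rw [← hvis']; exact PySem.Set.nodup_update vis ns hnd
        have hreach' : ∀ x ∈ vis ++ Δ, pvReach (pvE edges) start x := by
          intro x hx
          rcases List.mem_append.1 hx with hx | hx
          · exact hreach x hx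
          · exact Relation.ReflTransGen.tail (hreach cur hcurvis)
              ((hAdjcur x).2 (hΔprop x hx).1)
        have hsub : Δ.toFinset ⊆ pvVerts edges \ vis.toFinset := by
          intro x hx
          rw [List.mem_toFinset] at hx
          rcases hΔprop x hx with ⟨hxns, hxvis⟩
          rw [Finset.mem_sdiff, List.mem_toFinset]
          exact ⟨pvAdjRel_mem_verts ((hAdjcur x).2 hxns), hxvis⟩
        have hcard : (pvVerts edges \ (vis ++ Δ).toFinset).card
            = (pvVerts edges \ vis.toFinset).card - Δ.length := by
          have hsd : pvVerts edges \ (vis.toFinset ∪ Δ.toFinset)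
              = (pvVerts edges \ vis.toFinset) \ Δ.toFinset := by
            ext x; simp only [Finset.mem_sdiff, Finset.mem_union]; tauto
          rw [List.toFinset_append, hsd, Finset.card_sdiff,
            Finset.inter_eq_left.2 hsub, List.toFinset_card_of_nodup hΔnd]
        have hle : Δ.length ≤ (pvVerts edges \ vis.toFinset).card := by
          rw [← List.toFinset_card_of_nodup hΔnd]
          exact Finset.card_le_card hsub
        refine ih _ _ hnd' (by simp [hstart]) ?_ hreach' ?_ ?_
        · intro x hx
          rcases List.mem_append.1 hx with hx | hx
          · exact List.mem_append.2 (Or.inl (hqvis x (by simp [hx])))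
          · exact List.mem_append.2 (Or.inr hx)
        · intro u hu hq' w hw
          rcases List.mem_append.1 hu with hu | hu
          · by_cases hc : u = cur
            · subst hc
              have hwns : w ∈ ns := (hAdjcur w).1 hw
              by_cases hwv : w ∈ vis
              · exact List.mem_append.2 (Or.inl hwv)
              · refine List.mem_append.2 (Or.inr ?_)
                rw [hΔ, List.mem_filter]
                exact ⟨(PySem.Set.mem_ofList ns w).2 hwns, by simp [hwv]⟩
            · have : u ∉ cur :: q := by
                intro hmem
                rcases List.mem_cons.1 hmem with h | h
                · exact hc h
                · exact hq' (List.mem_append.2 (Or.inl h))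
              exact List.mem_append.2 (Or.inl (hclosed u hu this w hw))
          · exact absurd (List.mem_append.2 (Or.inr hu)) hq'
        · simp only [List.length_append, hcard]
          simp only [List.length_cons] at hfuel
          omega

lemma pvBfs_spec (edges : List String) (start : Int) :
    (pvBfs start (pvGenerateGraph edges) (2 + 4 * edges.length)).Nodup ∧
    ∀ v, v ∈ pvBfs start (pvGenerateGraph edges) (2 + 4 * edges.length) ↔
      pvReach (pvE edges) start v := by
  have hinit : PySem.Set.add PySem.Set.empty start = [start] := rfl
  unfold pvBfs
  rw [hinit]
  refine pvBfsLoop_spec edges start _ [start] [start] (by simp) (by simp) (by simp)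
    (fun x hx => by simp at hx; subst hx; exact Relation.ReflTransGen.refl) ?_ ?_
  · intro u hu hq
    simp at hu hq
    exact absurd hu hq
  · have h1 : (pvVerts edges \ [start].toFinset).card ≤ 2 * edges.length :=
      le_trans (Finset.card_le_card Finset.sdiff_subset) (pvVerts_card_le edges)
    simp only [List.length_cons, List.length_nil]
    omega

-- ---- saturation computes the reachable set ----
lemma pvNbhd_aux (adj : PySem.Dict Int (PySem.Set Int)) (l : List Int) :
    ∀ (acc : PySem.Set Int),
      (∀ x, x ∈ l.foldl (fun acc u => acc.update (adj.getD u PySem.Set.empty)) acc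
        ↔ x ∈ acc ∨ ∃ u ∈ l, x ∈ adj.getD u PySem.Set.empty) ∧
      (acc.Nodup → (l.foldl (fun acc u => acc.update (adj.getD u PySem.Set.empty)) acc).Nodup) := by
  induction l with
  | nil => intro acc; simp
  | cons u l ih =>
    intro acc
    rw [List.foldl_cons]
    refine ⟨fun x => ?_, fun hnd => (ih _).2 (PySem.Set.nodup_update acc _ hnd)⟩
    rw [(ih (acc.update (adj.getD u PySem.Set.empty))).1 x, PySem.Set.mem_update]
    simp only [List.mem_cons]
    constructor
    · rintro ((h | h) | ⟨w, hw, hx⟩)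
      · exact Or.inl h
      · exact Or.inr ⟨u, Or.inl rfl, h⟩
      · exact Or.inr ⟨w, Or.inr hw, hx⟩
    · rintro (h | ⟨w, (rfl | hw), hx⟩)
      · exact Or.inl (Or.inl h)
      · exact Or.inl (Or.inr hx)
      · exact Or.inr ⟨w, hw, hx⟩

lemma pvNbhd_mem (edges : List String) (frontier : PySem.Set Int) (x : Int) :
    x ∈ pvNbhd (pvAdj edges) frontier ↔ ∃ u ∈ frontier, pvAdjRel (pvE edges) u x := by
  unfold pvNbhd
  rw [(pvNbhd_aux (pvAdj edges) frontier PySem.Set.empty).1 x]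
  simp only [PySem.Set.empty]
  constructor
  · rintro (h | ⟨u, hu, hx⟩)
    · simp at h
    · exact ⟨u, hu, (pvAdj_mem edges u x).1 hx⟩
  · rintro ⟨u, hu, hx⟩
    exact Or.inr ⟨u, hu, (pvAdj_mem edges u x).2 hx⟩

lemma pvNbhd_nodup (edges : List String) (frontier : PySem.Set Int) :
    (pvNbhd (pvAdj edges) frontier).Nodup :=
  (pvNbhd_aux (pvAdj edges) frontier PySem.Set.empty).2 (by simp [PySem.Set.empty])

lemma pvSatLoop_spec (edges : List String) (v0 : Int) :
    ∀ (fuel : Nat) (frontier comp : PySem.Set Int),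
      comp.Nodup → v0 ∈ comp →
      (∀ x ∈ frontier, x ∈ comp) →
      (∀ x ∈ comp, pvReach (pvE edges) v0 x) →
      (∀ u ∈ comp, u ∉ frontier → ∀ w, pvAdjRel (pvE edges) u w → w ∈ comp) →
      (pvVerts edges \ comp.toFinset).card + frontier.length ≤ fuel →
      (pvSatLoop (pvAdj edges) fuel frontier comp).Nodup ∧
      ∀ v, v ∈ pvSatLoop (pvAdj edges) fuel frontier comp ↔ pvReach (pvE edges) v0 v := by
  intro fuel
  induction fuel with
  | zero =>
    intro frontier comp hnd hv0 _ hreach hclosed hfuel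
    have hf : frontier = [] := by
      cases frontier with
      | nil => rfl
      | cons a fs => simp at hfuel
    subst hf
    refine ⟨hnd, fun v => ⟨fun hv => hreach v hv, ?_⟩⟩
    exact fun h => pvReach_subset hv0 (fun u hu _ hw => hclosed u hu (by simp) _ hw) v h
  | succ fuel ih =>
    intro frontier comp hnd hv0 hfc hreach hclosed hfuel
    cases frontier with
    | nil =>
      refine ⟨hnd, fun v => ⟨fun hv => hreach v hv, ?_⟩⟩
      exact fun h => pvReach_subset hv0 (fun u hu _ hw => hclosed u hu (by simp) _ hw) v h
    | cons f fs =>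
      have hstep : pvSatLoop (pvAdj edges) (fuel + 1) (f :: fs) comp
          = pvSatLoop (pvAdj edges) fuel
              (PySem.Set.diff (pvNbhd (pvAdj edges) (f :: fs)) comp)
              (comp.update (PySem.Set.diff (pvNbhd (pvAdj edges) (f :: fs)) comp)) := by
        simp only [pvSatLoop]
      rw [hstep]
      set nf := PySem.Set.diff (pvNbhd (pvAdj edges) (f :: fs)) comp with hnf
      have hnf_mem : ∀ x, x ∈ nf ↔ (∃ u ∈ f :: fs, pvAdjRel (pvE edges) u x) ∧ x ∉ comp := by
        intro x
        rw [hnf, PySem.Set.mem_diff, pvNbhd_mem]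
      have hnfnd : nf.Nodup := PySem.Set.nodup_diff _ _ (pvNbhd_nodup edges (f :: fs))
      have hcomp' : comp.update nf = comp ++ nf :=
        PySem.Set.update_eq_append_of_disjoint comp nf hnfnd
          (fun x hx => ((hnf_mem x).1 hx).2)
      rw [hcomp']
      have hnd' : (comp ++ nf).Nodup := by
        rw [← hcomp']; exact PySem.Set.nodup_update comp nf hnd
      have hreach' : ∀ x ∈ comp ++ nf, pvReach (pvE edges) v0 x := by
        intro x hx
        rcases List.mem_append.1 hx with hx | hx
        · exact hreach x hx
        · rcases ((hnf_mem x).1 hx).1 with ⟨u, hu, hadj⟩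
          exact Relation.ReflTransGen.tail (hreach u (hfc u hu)) hadj
      have hsub : nf.toFinset ⊆ pvVerts edges \ comp.toFinset := by
        intro x hx
        rw [List.mem_toFinset] at hx
        rcases (hnf_mem x).1 hx with ⟨⟨u, _, hadj⟩, hxc⟩
        rw [Finset.mem_sdiff, List.mem_toFinset]
        exact ⟨pvAdjRel_mem_verts hadj, hxc⟩
      have hcard : (pvVerts edges \ (comp ++ nf).toFinset).card
          = (pvVerts edges \ comp.toFinset).card - nf.length := by
        have hsd : pvVerts edges \ (comp.toFinset ∪ nf.toFinset)
            = (pvVerts edges \ comp.toFinset) \ nf.toFinset := by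
          ext x; simp only [Finset.mem_sdiff, Finset.mem_union]; tauto
        rw [List.toFinset_append, hsd, Finset.card_sdiff,
          Finset.inter_eq_left.2 hsub, List.toFinset_card_of_nodup hnfnd]
      have hle : nf.length ≤ (pvVerts edges \ comp.toFinset).card := by
        rw [← List.toFinset_card_of_nodup hnfnd]
        exact Finset.card_le_card hsub
      refine ih nf (comp ++ nf) hnd' (by simp [hv0])
        (fun x hx => List.mem_append.2 (Or.inr hx)) hreach' ?_ ?_
      · intro u hu hq' w hw
        rcases List.mem_append.1 hu with hu | hu
        · by_cases huf : u ∈ f :: fs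
          · by_cases hwc : w ∈ comp
            · exact List.mem_append.2 (Or.inl hwc)
            · exact List.mem_append.2 (Or.inr ((hnf_mem w).2 ⟨⟨u, huf, hw⟩, hwc⟩))
          · exact List.mem_append.2 (Or.inl (hclosed u hu huf w hw))
        · exact absurd hu hq'
      · rw [hcard]
        simp only [List.length_cons] at hfuel
        omega

lemma pvSat_spec (edges : List String) (start : Int) :
    (pvSatLoop (pvAdj edges) (2 + 4 * edges.length) [start] [start]).Nodup ∧
    ∀ v, v ∈ pvSatLoop (pvAdj edges) (2 + 4 * edges.length) [start] [start] ↔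
      pvReach (pvE edges) start v := by
  refine pvSatLoop_spec edges start _ [start] [start] (by simp) (by simp) (fun x hx => hx)
    (fun x hx => by simp at hx; subst hx; exact Relation.ReflTransGen.refl) ?_ ?_
  · intro u hu hq
    simp at hu
    subst hu
    exact absurd (by simp) hq
  · have h1 : (pvVerts edges \ [start].toFinset).card ≤ 2 * edges.length :=
      le_trans (Finset.card_le_card Finset.sdiff_subset) (pvVerts_card_le edges)
    simp only [List.length_cons, List.length_nil]
    omega

-- the two component computations agree in membership and in size
lemma pvComp_eq (edges : List String) (v : Int) :
    (∀ x, x ∈ pvSatLoop (pvAdj edges) (2 + 4 * edges.length) [v] [v] ↔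
       x ∈ pvBfs v (pvGenerateGraph edges) (2 + 4 * edges.length)) ∧
    (pvSatLoop (pvAdj edges) (2 + 4 * edges.length) [v] [v]).length
      = (pvBfs v (pvGenerateGraph edges) (2 + 4 * edges.length)).length := by
  obtain ⟨hnd1, hm1⟩ := pvSat_spec edges v
  obtain ⟨hnd2, hm2⟩ := pvBfs_spec edges v
  have hm : ∀ x, x ∈ pvSatLoop (pvAdj edges) (2 + 4 * edges.length) [v] [v] ↔
      x ∈ pvBfs v (pvGenerateGraph edges) (2 + 4 * edges.length) :=
    fun x => (hm1 x).trans (hm2 x).symm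
  exact ⟨hm, ((List.perm_ext_iff_of_nodup hnd1 hnd2).2 hm).length_eq⟩

-- B's inline integer ceil-sqrt is pvCeilSqrt
lemma pvCeil_eq (k : Nat) :
    (if ((Nat.sqrt k : Int)) * (Nat.sqrt k : Int) = (k : Int) then ((Nat.sqrt k : Int))
     else ((Nat.sqrt k : Int)) + 1) = pvCeilSqrt k := by
  unfold pvCeilSqrt
  by_cases h : Nat.sqrt k * Nat.sqrt k = k
  · have h' : ((Nat.sqrt k : Int)) * (Nat.sqrt k : Int) = (k : Int) := by exact_mod_cast h
    simp [h, h']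
  · have h' : ¬ ((Nat.sqrt k : Int) * (Nat.sqrt k : Int) = (k : Int)) := by
      exact_mod_cast h
    simp [h, h']

-- A's worklist loop over the not-yet-seen vertices equals B's skipping scan
lemma pvOuter (n : Int) (edges : List String) :
    ∀ (L : List Int) (seen : PySem.Set Int) (s c : Int) (fuel : Nat),
      (L.filter (fun v => !seen.contains v)).length ≤ fuel →
      (pvSolveLoop (pvGenerateGraph edges) (2 + 4 * edges.length) fuel
          (L.filter (fun v => !seen.contains v)) s c).1
        + (n - (pvSolveLoop (pvGenerateGraph edges) (2 + 4 * edges.length) fuel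
          (L.filter (fun v => !seen.contains v)) s c).2)
      = (L.foldl (fun (st : PySem.Set Int × Int) v =>
          if st.1.contains v then st
          else
            let comp := pvSatLoop (pvAdj edges) (2 + 4 * edges.length) [v] [v]
            let s : Int := comp.length
            let r : Int := (Nat.sqrt comp.length : Int)
            (st.1.update comp, st.2 + ((if r * r = s then r else r + 1) - s)))
          (seen, s + (n - c))).2 := by
  intro L
  induction L with
  | nil =>
    intro seen s c fuel _
    cases fuel <;> simp [pvSolveLoop]
  | cons v L ihL =>
    intro seen s c fuel hf
    rw [List.foldl_cons]
    by_cases hv : (seen.contains v : Bool) = true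
    · have hmemv : v ∈ seen := (PySem.Set.contains_iff seen v).1 hv
      rw [List.filter_cons_of_neg (by simp [hmemv])] at hf ⊢
      rw [if_pos hv]
      exact ihL seen s c fuel hf
    · have hmemv : v ∉ seen := fun hm => hv ((PySem.Set.contains_iff seen v).2 hm)
      rw [List.filter_cons_of_pos (by simp [hmemv])] at hf ⊢
      rw [if_neg hv]
      cases fuel with
      | zero => simp at hf
      | succ fuel =>
        set Cv := pvBfs v (pvGenerateGraph edges) (2 + 4 * edges.length) with hCv
        set comp := pvSatLoop (pvAdj edges) (2 + 4 * edges.length) [v] [v] with hcomp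
        obtain ⟨hcm, hcl⟩ := pvComp_eq edges v
        have hcm' : ∀ x, x ∈ comp ↔ x ∈ Cv := fun x => by rw [hcomp, hCv]; exact hcm x
        have hcl' : comp.length = Cv.length := by rw [hcomp, hCv]; exact hcl
        have hstep : pvSolveLoop (pvGenerateGraph edges) (2 + 4 * edges.length) (fuel + 1)
            (v :: L.filter (fun v => !seen.contains v)) s c
            = pvSolveLoop (pvGenerateGraph edges) (2 + 4 * edges.length) fuel
                (PySem.Set.diff (L.filter (fun v => !seen.contains v)) Cv)
                (s + pvCeilSqrt Cv.length) (c + Cv.length) := by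
          simp only [pvSolveLoop, pvBfs, hCv]
        rw [hstep]
        have hdiff : PySem.Set.diff (L.filter (fun v => !seen.contains v)) Cv
            = L.filter (fun x => !(seen.update comp).contains x) := by
          show List.filter _ (List.filter _ _) = _
          rw [List.filter_filter]
          refine List.filter_congr ?_
          intro x _
          by_cases hxs : x ∈ seen <;> by_cases hxc : x ∈ Cv <;>
            simp [hxs, hxc, PySem.Set.mem_update, hcm' x]
        rw [hdiff]
        have hflen : (L.filter (fun x => !(seen.update comp).contains x)).length ≤ fuel := by
          have hmono : (L.filter (fun x => !(seen.update comp).contains x)).length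
              ≤ (L.filter (fun v => !seen.contains v)).length := by
            simp only [← List.countP_eq_length_filter]
            refine List.countP_mono_left ?_
            intro x _ hx
            simp only [Bool.not_eq_true'] at hx ⊢
            simp [PySem.Set.mem_update] at hx
            simp [hx.1]
          simp only [List.length_cons] at hf
          omega
        have hcm_len_ceil : pvCeilSqrt comp.length = pvCeilSqrt Cv.length := by rw [hcl']
        have hcm_len_cast : ((comp.length : Int)) = ((Cv.length : Int)) := by rw [hcl']
        have hrec := ihL (seen.update comp) (s + pvCeilSqrt Cv.length) (c + Cv.length) fuel hflen
        rw [hrec]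
        congr 2
        simp only [pvCeil_eq]
        rw [Prod.mk.injEq]
        refine ⟨rfl, ?_⟩
        rw [hcm_len_ceil, hcm_len_cast]
        ring

-- ===== VERDICT (by name: the statement is the Claim_ definition above) =====
theorem solve_generate_graph_spec : Claim_equal_solve_generate_graph := by
  intro n edges _ _
  unfold Spec_solve_generate_graph solve_generate_graph solve_generate_graph_alt
  have hset : PySem.Set.ofList (PySem.List.pyRange 1 (n + 1) 1)
      = PySem.List.pyRange 1 (n + 1) 1 :=
    PySem.Set.ofList_eq_self_of_nodup _ (PySem.List.nodup_pyRange_one 1 (n + 1))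
  have hfilter : (PySem.List.pyRange 1 (n + 1) 1).filter
      (fun v => !(PySem.Set.empty : PySem.Set Int).contains v)
      = PySem.List.pyRange 1 (n + 1) 1 := by
    refine List.filter_eq_self.mpr ?_
    intro a _
    simp [PySem.Set.empty]
  have h := pvOuter n edges (PySem.List.pyRange 1 (n + 1) 1) PySem.Set.empty 0 0
    (PySem.List.pyRange 1 (n + 1) 1).length (by rw [hfilter])
  rw [hfilter] at h
  simp only [hset, zero_add, sub_zero] at h ⊢
  exact h
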